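-- pv_equiv track=rewrite | github.com/bfiedler/Scrabble | scrabble.py | trylay
-- ===== SOURCE A (Python) =====
-- def trylay(tiles,fit,j):
--     f=list(fit)
--     t=tiles
--     p=j
--     tch=False # True when placed on square that is adjacent
--
--     for n in range(len(t)):
--         while p<15 and (f[p] not in '-@'): #skip square if tile is there
--             p+=1
--         if p > 14:
--             return [] #not all tiles could be played
--         if fit[p]=='@': tch=True # will place on square labeled @
--         f[p] = t[n]
--     if not tch:
--         return []
--     else:
--         return f # return fit with newly placed letters
-- ===== SOURCE B (Python) =====
-- def trylay(tiles, fit, j):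
--     # Staged decomposition: collect the chosen placement indices first,
--     # then check the '@'-adjacency over them, then write all tiles in one batch.
--     chosen = []
--     i = j
--     while len(chosen) < len(tiles):
--         if i > 14:
--             return []
--         if fit[i] in '-@':
--             chosen.append(i)
--         i += 1
--     if not any(fit[i] == '@' for i in chosen):
--         return []
--     f = list(fit)
--     for t, i in zip(tiles, chosen):
--         f[i] = t
--     return f
-- ===== Notes on version B (the rewrite author's own statement) =====
-- stated objective: simpler
-- what changed: A's interleaved mutate-as-you-scan loop (for over tiles with an inner while skipping occupied squares of the board being mutated) is replaced by staged passes: collect the placeable indices from the original board, check feasibility and the '@'-adjacency over the chosen prefix, then write all tiles in one batch.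
-- outside the precondition, e.g. on trylay(['', '-'], '-@', 0): A returns [], B returns ['', '-']; on trylay(['a'], '@-', -2): A returns ['a', '-'], B returns ['a', '-']
import Mathlib
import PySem

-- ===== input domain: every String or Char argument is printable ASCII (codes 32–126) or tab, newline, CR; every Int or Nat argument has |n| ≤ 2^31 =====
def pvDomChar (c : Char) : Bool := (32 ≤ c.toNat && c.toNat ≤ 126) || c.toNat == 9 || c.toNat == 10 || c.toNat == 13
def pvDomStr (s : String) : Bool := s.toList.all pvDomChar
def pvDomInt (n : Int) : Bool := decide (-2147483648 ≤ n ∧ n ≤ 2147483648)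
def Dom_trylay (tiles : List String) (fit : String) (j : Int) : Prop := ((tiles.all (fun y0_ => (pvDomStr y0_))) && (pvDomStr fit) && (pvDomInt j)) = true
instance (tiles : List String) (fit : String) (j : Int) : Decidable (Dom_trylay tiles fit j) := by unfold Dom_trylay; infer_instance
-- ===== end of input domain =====

-- B replaces A's mutate-as-you-scan placement loop by staged passes (collect placeable indices, check, batch-write); same cost, simpler decomposition.


-- ===== PORT A =====
-- Python `s in '-@'` (substring test against the constant "-@"): exact, the substrings of "-@" are these four strings
def pvInDashAt (s : String) : Bool := s == "" || s == "-" || s == "@" || s == "-@"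

-- A's inner while loop: skip squares whose current content is not in '-@' while p < 15.
-- The .getD "" default is only reached where Python raises IndexError (excluded by Pre_trylay); "" makes the loop stop there.
def pvSkip (f : List String) (p : Int) : Int :=
  if h : p < 15 ∧ ¬ pvInDashAt ((PySem.List.pyGet? f p).getD "") then pvSkip f (p + 1) else p
termination_by (15 - p).toNat
decreasing_by simp_wf; omega

-- A's for-loop over the tiles, carrying (f, p, tch); fitC is list(fit) for the `fit[p]=='@'` test.
def pvGoA (fitC : List Char) (ts : List String) (f : List String) (p : Int) (tch : Bool) : List String :=
  match ts with
  | [] => if tch then f else []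
  | t :: rest =>
    let p' := pvSkip f p
    if p' > 14 then []
    else
      let tch' := if ((PySem.List.pyGet? fitC p').getD ' ') == '@' then true else tch
      pvGoA fitC rest (PySem.List.pySetD f p' t) p' tch'

def trylay (tiles : List String) (fit : String) (j : Int) : List String :=
  pvGoA fit.toList tiles (fit.toList.map (fun c => String.ofList [c])) j false

-- ===== PORT B =====
-- `fit[i] in '-@'` on the single character fit[i]
def pvEmptyCh (c : Char) : Bool := c == '-' || c == '@'

-- Source B's collection stage: while len(chosen) < len(tiles): bail out past square 14,
-- append placeable indices; none = the `return []` inside the loop.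
-- The .getD ' ' default is only reached where Python raises IndexError (excluded by Pre_trylay).
def pvCollect (fitC : List Char) (need : Nat) (chosen : List Int) (i : Int) : Option (List Int) :=
  if chosen.length < need then
    if i > 14 then none
    else pvCollect fitC need
      (if pvEmptyCh ((PySem.List.pyGet? fitC i).getD ' ') then chosen ++ [i] else chosen) (i + 1)
  else some chosen
termination_by (15 - i).toNat
decreasing_by simp_wf; omega

-- Source B's final batch write: for t, i in zip(tiles, chosen): f[i] = t
def pvWriteAll (f : List String) (ps : List (String × Int)) : List String :=
  ps.foldl (fun f ti => PySem.List.pySetD f ti.2 ti.1) f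

def trylay_alt (tiles : List String) (fit : String) (j : Int) : List String :=
  match pvCollect fit.toList tiles.length [] j with
  | none => []
  | some chosen =>
    if !(chosen.any (fun i => ((PySem.List.pyGet? fit.toList i).getD ' ') == '@')) then []
    else pvWriteAll (fit.toList.map (fun c => String.ofList [c])) (tiles.zip chosen)

-- ===== PRECONDITION & SPEC =====
-- Pre_ restricts to the game's natural domain: no tiles at all or a start past square 14
-- (nothing is read), or a non-negative start index with a board the scan cannot run off the
-- end of (full 15 squares, or enough placeable squares in fit[j:] for all the tiles) and
-- tiles that are letters, not the board markers ''/'-'/'@'/'-@'. Outside it A raises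
-- IndexError, relies on negative-index wraparound, or re-fills a square because a placed
-- marker-string still tests as empty — accidents of A's in-place scan that A still returns
-- values from on some such inputs (see the cited examples).
def Pre_trylay (tiles : List String) (fit : String) (j : Int) : Prop :=
  tiles = [] ∨ 15 ≤ j ∨
    (0 ≤ j ∧
      (15 ≤ (fit.toList.length : Int) ∨
        tiles.length ≤ (fit.toList.drop j.toNat).countP pvEmptyCh) ∧
      ∀ t ∈ tiles, pvInDashAt t = false)
instance (tiles : List String) (fit : String) (j : Int) : Decidable (Pre_trylay tiles fit j) := by
  unfold Pre_trylay; infer_instance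
def pvWitness_trylay : List String × String × Int := (["a"], "-----@---------", 0)

def Spec_trylay (tiles : List String) (fit : String) (j : Int) (out : List String) : Prop := out = trylay_alt tiles fit j
instance (tiles : List String) (fit : String) (j : Int) (out : List String) : Decidable (Spec_trylay tiles fit j out) := by unfold Spec_trylay; infer_instance

-- ===== CLAIM (what is proved, stated in full; the proofs are below) =====
def Claim_equal_trylay : Prop := ∀ (tiles : List String) (fit : String) (j : Int), Dom_trylay tiles fit j → Pre_trylay tiles fit j → Spec_trylay tiles fit j (trylay tiles fit j)

-- ===== LEMMAS AND PROOFS =====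

-- the square at index i of board f currently tests as placeable in A's scan
def pvEmpS (f : List String) (i : Int) : Bool := pvInDashAt ((PySem.List.pyGet? f i).getD "")

-- the placeable indices of board f in [p, 15), in scan order
def pvE (f : List String) (p : Int) : List Int :=
  (PySem.List.pyRange p 15 1).filter (fun i => pvEmpS f i)

-- proof-side staging of A's loop: place tiles at a given index list
def pvBspec (fitC : List Char) (ts : List String) (es : List Int) (f : List String) (tch : Bool) : List String :=
  match ts, es with
  | [], _ => if tch then f else []
  | _ :: _, [] => []
  | t :: rest, e :: es' =>
      pvBspec fitC rest es' (PySem.List.pySetD f e t)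
        (if ((PySem.List.pyGet? fitC e).getD ' ') == '@' then true else tch)

lemma pvSkip_stop (f : List String) (p : Int)
    (h : ¬ (p < 15 ∧ ¬ pvInDashAt ((PySem.List.pyGet? f p).getD ""))) : pvSkip f p = p := by
  rw [pvSkip, dif_neg h]

lemma pvSkip_step (f : List String) (p : Int)
    (h : p < 15 ∧ ¬ pvInDashAt ((PySem.List.pyGet? f p).getD "")) : pvSkip f p = pvSkip f (p + 1) := by
  rw [pvSkip, dif_pos h]

lemma pvInDashAt_singleton (c : Char) : pvInDashAt (String.ofList [c]) = pvEmptyCh c := by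
  unfold pvInDashAt pvEmptyCh
  rw [Bool.eq_iff_iff]
  simp [beq_iff_eq, ← String.toList_inj,
    show ("" : String).toList = [] from rfl, show ("-" : String).toList = ['-'] from rfl,
    show ("@" : String).toList = ['@'] from rfl, show ("-@" : String).toList = ['-', '@'] from rfl]

lemma pvGoA_cons (fitC : List Char) (t : String) (rest : List String) (f : List String) (p : Int) (tch : Bool) :
    pvGoA fitC (t :: rest) f p tch =
      if pvSkip f p > 14 then []
      else pvGoA fitC rest (PySem.List.pySetD f (pvSkip f p) t) (pvSkip f p)
        (if ((PySem.List.pyGet? fitC (pvSkip f p)).getD ' ') == '@' then true else tch) := rfl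

lemma pvBspec_cons (fitC : List Char) (t : String) (rest : List String) (e : Int) (es' : List Int)
    (f : List String) (tch : Bool) :
    pvBspec fitC (t :: rest) (e :: es') f tch =
      pvBspec fitC rest es' (PySem.List.pySetD f e t)
        (if ((PySem.List.pyGet? fitC e).getD ' ') == '@' then true else tch) := rfl

lemma pvSkip_spec (f : List String) (p : Int) :
    p ≤ pvSkip f p ∧ (p ≤ 15 → pvSkip f p ≤ 15) ∧
      (pvSkip f p < 15 → pvEmpS f (pvSkip f p) = true) ∧ pvE f p = pvE f (pvSkip f p) := by
  fun_induction pvSkip f p with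
  | case1 p h ih =>
    obtain ⟨i1, i2, i3, i4⟩ := ih
    refine ⟨by omega, fun _ => i2 (by omega), i3, ?_⟩
    rw [← i4]
    unfold pvE
    rw [PySem.List.pyRange_one_cons h.1, List.filter_cons]
    have : pvEmpS f p = false := by
      unfold pvEmpS; exact Bool.not_eq_true _ ▸ (by simpa using h.2)
    simp [this]
  | case2 p h =>
    refine ⟨le_refl _, fun h' => h', fun h15 => ?_, rfl⟩
    by_contra hne
    exact h ⟨h15, by simpa [pvEmpS] using hne⟩

lemma pvGoA_advance (fitC : List Char) (ts : List String) (f : List String) (p : Int) (tch : Bool)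
    (hp : p < 15) (hocc : pvEmpS f p = false) :
    pvGoA fitC ts f p tch = pvGoA fitC ts f (p + 1) tch := by
  cases ts with
  | nil => rfl
  | cons t rest =>
    rw [pvGoA_cons, pvGoA_cons, pvSkip_step f p ⟨hp, by simp [pvEmpS] at hocc; simp [hocc]⟩]

-- the in-range placeable indices of f ahead of p, as A's scan can actually consume them
def pvCntR (f : List String) (p : Int) : Nat :=
  (pvE f p).countP (fun i => decide (i < (f.length : Int)))

lemma pvCntR_zero_of_ge (f : List String) (p : Int) (h : (f.length : Int) ≤ p) :
    pvCntR f p = 0 := by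
  unfold pvCntR
  refine List.countP_eq_zero.2 (fun i hi => ?_)
  have hmem := List.mem_filter.1 hi
  have := (PySem.List.mem_pyRange_one).1 hmem.1
  simp only [decide_eq_true_eq]
  omega

lemma pvGoA_eq_bspec (fitC : List Char) (ts : List String) (f : List String) (p : Int) (tch : Bool)
    (hp : 0 ≤ p) (h15 : 15 ≤ (f.length : Int) ∨ 15 ≤ p ∨ ts.length ≤ pvCntR f p)
    (htl : ∀ t ∈ ts, pvInDashAt t = false) :
    pvGoA fitC ts f p tch = pvBspec fitC ts (pvE f p) f tch := by
  induction ts generalizing f p tch with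
  | nil => rfl
  | cons t rest ih =>
    obtain ⟨hle, hub, hemp, hE⟩ := pvSkip_spec f p
    by_cases h15p : 15 ≤ p
    · have hsk : pvSkip f p = p := pvSkip_stop f p (by rintro ⟨h1, -⟩; omega)
      rw [pvGoA_cons, hsk, if_pos (by omega)]
      unfold pvE
      rw [PySem.List.pyRange_one_eq_nil (by omega), List.filter_nil]
      rfl
    · by_cases hbig : pvSkip f p > 14
      · rw [pvGoA_cons, if_pos hbig, hE]
        unfold pvE
        rw [PySem.List.pyRange_one_eq_nil (by omega), List.filter_nil]
        rfl
      · have hp15 : pvSkip f p < 15 := by omega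
        have hempty := hemp hp15
        have hp0 : (0 : Int) ≤ pvSkip f p := le_trans hp hle
        have hcnt : pvCntR f p = pvCntR f (pvSkip f p) := by unfold pvCntR; rw [hE]
        have hnat : (pvSkip f p).toNat < f.length := by
          rcases h15 with hlen | h | hc
          · omega
          · omega
          · by_contra hge
            have h0 : pvCntR f (pvSkip f p) = 0 :=
              pvCntR_zero_of_ge f (pvSkip f p) (by omega)
            simp [hcnt, h0] at hc
        have hEcons : pvE f (pvSkip f p) = pvSkip f p :: pvE f (pvSkip f p + 1) := by
          unfold pvE
          rw [PySem.List.pyRange_one_cons hp15, List.filter_cons]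
          simp [hempty]
        have hself : PySem.List.pyGet? (PySem.List.pySetD f (pvSkip f p) t) (pvSkip f p) = some t := by
          rw [PySem.List.pySetD_of_nonneg _ _ hp0, PySem.List.pyGet?_of_nonneg _ hp0]
          simp [List.getElem?_set_self (by simpa using hnat)]
        have hocc' : pvEmpS (PySem.List.pySetD f (pvSkip f p) t) (pvSkip f p) = false := by
          simp [pvEmpS, hself, htl t (List.mem_cons_self)]
        have hkeep : pvE (PySem.List.pySetD f (pvSkip f p) t) (pvSkip f p + 1) = pvE f (pvSkip f p + 1) := by
          unfold pvE
          apply List.filter_congr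
          intro i hi
          obtain ⟨hi1, hi2⟩ := (PySem.List.mem_pyRange_one).1 hi
          have h0i : (0 : Int) ≤ i := by omega
          have hne : i.toNat ≠ (pvSkip f p).toNat := by omega
          simp [pvEmpS, PySem.List.pySetD_of_nonneg _ _ hp0, PySem.List.pyGet?_of_nonneg _ h0i,
            List.getElem?_set_ne (by simpa using Ne.symm hne)]
        have hcntR : pvCntR f (pvSkip f p) = pvCntR f (pvSkip f p + 1) + 1 := by
          unfold pvCntR
          rw [hEcons, List.countP_cons, if_pos (by simp only [decide_eq_true_eq]; omega)]
        have hIH : 15 ≤ ((PySem.List.pySetD f (pvSkip f p) t).length : Int) ∨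
            15 ≤ pvSkip f p + 1 ∨
            rest.length ≤ pvCntR (PySem.List.pySetD f (pvSkip f p) t) (pvSkip f p + 1) := by
          rcases h15 with hlen | h | hc
          · exact Or.inl (by rw [PySem.List.length_pySetD]; exact hlen)
          · omega
          · refine Or.inr (Or.inr ?_)
            have : pvCntR (PySem.List.pySetD f (pvSkip f p) t) (pvSkip f p + 1) =
                pvCntR f (pvSkip f p + 1) := by
              unfold pvCntR
              rw [hkeep, PySem.List.length_pySetD]
            rw [this]
            simp only [List.length_cons] at hc
            omega
        rw [pvGoA_cons, if_neg hbig, hE, hEcons, pvBspec_cons,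
          pvGoA_advance _ _ _ _ _ hp15 hocc', ih _ _ _ (by omega) hIH
            (fun x hx => htl x (List.mem_cons_of_mem _ hx)), hkeep]

lemma pvBspec_staged (fitC : List Char) (ts : List String) (es : List Int) (f : List String) (tch : Bool) :
    pvBspec fitC ts es f tch =
      if es.length < ts.length then []
      else if !(tch || (es.take ts.length).any (fun i => ((PySem.List.pyGet? fitC i).getD ' ') == '@')) then []
      else pvWriteAll f (ts.zip (es.take ts.length)) := by
  induction ts generalizing es f tch with
  | nil =>
    cases tch <;> simp [pvBspec, pvWriteAll]
  | cons t rest ih =>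
    cases es with
    | nil => simp [pvBspec]
    | cons e es' =>
      rw [pvBspec_cons, ih]
      by_cases hlt : es'.length < rest.length
      · simp [hlt]
      · rw [if_neg hlt, if_neg (show ¬((e :: es').length < (t :: rest).length) by simp [hlt])]
        simp only [List.length_cons, List.take_succ_cons, List.any_cons, List.zip_cons_cons]
        have hw : pvWriteAll f ((t, e) :: rest.zip (es'.take rest.length)) =
            pvWriteAll (PySem.List.pySetD f e t) (rest.zip (es'.take rest.length)) := rfl
        cases tch <;> simp [hw]

-- the placeable indices of the original board in [i, 15), as B's collection stage sees them
def pvEB (fitC : List Char) (i : Int) : List Int :=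
  (PySem.List.pyRange i 15 1).filter (fun k => pvEmptyCh ((PySem.List.pyGet? fitC k).getD ' '))

lemma pvCollect_spec (fitC : List Char) (need : Nat) (chosen : List Int) (i : Int) :
    pvCollect fitC need chosen i =
      if chosen.length + (pvEB fitC i).length < need then none
      else some (chosen ++ (pvEB fitC i).take (need - chosen.length)) := by
  fun_induction pvCollect fitC need chosen i with
  | case1 chosen i hlt hbig =>
    have hEB : pvEB fitC i = [] := by
      unfold pvEB
      rw [PySem.List.pyRange_one_eq_nil (by omega), List.filter_nil]
    rw [hEB, if_pos (by simpa using hlt)]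
  | case2 chosen i hlt hbig ih =>
    by_cases hc : pvEmptyCh ((PySem.List.pyGet? fitC i).getD ' ')
    · rw [dif_pos hc] at ih
      rw [if_pos hc, ih]
      have hEB : pvEB fitC i = i :: pvEB fitC (i + 1) := by
        unfold pvEB
        rw [PySem.List.pyRange_one_cons (by omega : i < 15), List.filter_cons]
        simp [hc]
      rw [hEB]
      have hlen : (chosen ++ [i]).length = chosen.length + 1 := by simp
      by_cases h2 : chosen.length + (i :: pvEB fitC (i + 1)).length < need
      · rw [if_pos (by simp at h2 ⊢; omega), if_pos (by simpa using h2)]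
      · rw [if_neg (by simp at h2 ⊢; omega), if_neg (by simpa using h2)]
        have harith : need - chosen.length = (need - (chosen ++ [i]).length) + 1 := by
          simp at h2 ⊢; omega
        rw [harith, List.take_succ_cons]
        simp
    · rw [dif_neg hc] at ih
      rw [if_neg hc, ih]
      have hEB : pvEB fitC i = pvEB fitC (i + 1) := by
        unfold pvEB
        rw [PySem.List.pyRange_one_cons (by omega : i < 15), List.filter_cons]
        simp [hc]
      rw [hEB]
  | case3 chosen i hge =>
    rw [if_neg (by simp at hge ⊢; omega)]
    have : need - chosen.length = 0 := by simp at hge; omega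
    rw [this]
    simp

-- on a board of at most 15 squares, A's in-range placeable count from j is B's count over fit[j:]
lemma pvCntR_map_singleton (fitC : List Char) (j : Int) (hj : 0 ≤ j)
    (hlen : (fitC.length : Int) ≤ 15) :
    pvCntR (fitC.map (fun c => String.ofList [c])) j = (fitC.drop j.toNat).countP pvEmptyCh := by
  unfold pvCntR pvE
  rw [List.countP_filter]
  by_cases hjl : j ≤ (fitC.length : Int)
  · rw [PySem.List.pyRange_one_append j (fitC.length : Int) 15 hjl hlen, List.countP_append]
    have h2 : (PySem.List.pyRange ((fitC.length : Int)) 15).countP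
        (fun i => (decide (i < (((fitC.map (fun c => String.ofList [c])).length : Int))) &&
          pvEmpS (fitC.map (fun c => String.ofList [c])) i)) = 0 := by
      refine List.countP_eq_zero.2 (fun i hi => ?_)
      obtain ⟨hi1, hi2⟩ := (PySem.List.mem_pyRange_one).1 hi
      simp only [Bool.and_eq_true, decide_eq_true_eq, List.length_map, not_and]
      intro hlt
      omega
    rw [h2, Nat.add_zero, ← PySem.List.map_pyGetD_pyRange' fitC ' ' hj, List.countP_map]
    refine List.countP_congr (fun i hi => ?_)
    obtain ⟨hi1, hi2⟩ := (PySem.List.mem_pyRange_one).1 hi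
    have h0i : (0 : Int) ≤ i := le_trans hj hi1
    have hiL : i.toNat < fitC.length := by omega
    have hg1 : PySem.List.pyGet? (fitC.map (fun c => String.ofList [c])) i =
        some (String.ofList [fitC[i.toNat]]) := by
      rw [PySem.List.pyGet?_of_nonneg _ h0i]
      simp only [List.getElem?_map, List.getElem?_eq_getElem hiL, Option.map_some]
    have hgD : PySem.List.pyGetD fitC i ' ' = fitC[i.toNat] := by
      rw [PySem.List.pyGetD_of_nonneg _ _ h0i, List.getD_eq_getElem?_getD,
        List.getElem?_eq_getElem hiL, Option.getD_some]
    simp only [pvEmpS, hg1, Option.getD_some, pvInDashAt_singleton, List.length_map]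
    rw [show (decide (i < ((fitC.length : Int)))) = true from by
      simp only [decide_eq_true_eq]; omega]
    simp [hgD]
  · rw [List.drop_eq_nil_of_le (by omega), List.countP_nil]
    refine List.countP_eq_zero.2 (fun i hi => ?_)
    obtain ⟨hi1, hi2⟩ := (PySem.List.mem_pyRange_one).1 hi
    simp only [Bool.and_eq_true, decide_eq_true_eq, List.length_map, not_and]
    intro hlt
    omega

-- ===== VERDICT (by name: the statement is the Claim_ definition above) =====
theorem trylay_spec : Claim_equal_trylay := by
  intro tiles fit j _ hpre
  unfold Spec_trylay
  rcases hpre with hnil | hjbig | ⟨hj, h15, htl⟩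
  · subst hnil
    unfold trylay trylay_alt
    rw [pvCollect_spec]
    simp [pvGoA]
  · unfold trylay trylay_alt
    rw [pvCollect_spec]
    have hEB : pvEB fit.toList j = [] := by
      unfold pvEB
      rw [PySem.List.pyRange_one_eq_nil (by omega), List.filter_nil]
    cases tiles with
    | nil => rw [hEB]; simp [pvGoA]
    | cons t rest =>
      have hsk : pvSkip (fit.toList.map (fun c => String.ofList [c])) j = j :=
        pvSkip_stop _ _ (by rintro ⟨h1, -⟩; omega)
      rw [pvGoA_cons, hsk, if_pos (by omega), hEB]
      simp
  · unfold trylay trylay_alt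
    rw [pvCollect_spec]
    set F := fit.toList with hF
    set f0 := F.map (fun c => String.ofList [c]) with hf0
    have hlen0 : f0.length = F.length := by simp [hf0]
    have hpt : ∀ i : Int, 0 ≤ i → i.toNat < F.length →
        pvEmpS f0 i = pvEmptyCh ((PySem.List.pyGet? F i).getD ' ') := by
      intro i h0i hiL
      have hg1 : PySem.List.pyGet? f0 i = some (String.ofList [F[i.toNat]]) := by
        rw [hf0, PySem.List.pyGet?_of_nonneg _ h0i]
        simp only [List.getElem?_map, List.getElem?_eq_getElem hiL, Option.map_some]
      have hg2 : PySem.List.pyGet? F i = some F[i.toNat] := by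
        rw [PySem.List.pyGet?_of_nonneg _ h0i]
        simp only [List.getElem?_eq_getElem hiL]
      simp only [pvEmpS, hg1, hg2, Option.getD_some]
      exact pvInDashAt_singleton _
    have h15' : 15 ≤ (f0.length : Int) ∨ 15 ≤ j ∨ tiles.length ≤ pvCntR f0 j := by
      rcases h15 with h | h
      · exact Or.inl (by rw [hlen0]; exact h)
      · by_cases hlenb : 15 ≤ (F.length : Int)
        · exact Or.inl (by rw [hlen0]; exact hlenb)
        · exact Or.inr (Or.inr (by
            rw [hf0, pvCntR_map_singleton F j hj (by omega)]
            exact h))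
    rw [pvGoA_eq_bspec F tiles f0 j false hj h15' htl, pvBspec_staged]
    simp only [List.length_nil, Nat.zero_add, Nat.sub_zero, List.nil_append]
    have hmain : (pvE f0 j).take tiles.length = (pvEB F j).take tiles.length ∧
        ((pvE f0 j).length < tiles.length ↔ (pvEB F j).length < tiles.length) := by
      by_cases hbig : 15 ≤ (F.length : Int) ∨ 15 ≤ j
      · have hEE : pvE f0 j = pvEB F j := by
          unfold pvE pvEB
          refine List.filter_congr (fun i hi => ?_)
          obtain ⟨hi1, hi2⟩ := (PySem.List.mem_pyRange_one).1 hi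
          rcases hbig with hb | hb
          · exact hpt i (by omega) (by omega)
          · omega
        rw [hEE]
        exact ⟨rfl, Iff.rfl⟩
      · have hflt : ¬ 15 ≤ (F.length : Int) := fun h => hbig (Or.inl h)
        have hjlt : ¬ 15 ≤ j := fun h => hbig (Or.inr h)
        have hcnt : tiles.length ≤ (F.drop j.toNat).countP pvEmptyCh := by
          rcases h15 with h | h
          · omega
          · exact h
        by_cases hjl : j ≤ (F.length : Int)
        · have hsplit : PySem.List.pyRange j 15 =
              PySem.List.pyRange j (F.length : Int) ++ PySem.List.pyRange (F.length : Int) 15 :=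
            PySem.List.pyRange_one_append _ _ _ hjl (by omega)
          have hReq : (PySem.List.pyRange j (F.length : Int)).filter (fun i => pvEmpS f0 i) =
              (PySem.List.pyRange j (F.length : Int)).filter
                (fun i => pvEmptyCh ((PySem.List.pyGet? F i).getD ' ')) := by
            refine List.filter_congr (fun i hi => ?_)
            obtain ⟨hi1, hi2⟩ := (PySem.List.mem_pyRange_one).1 hi
            exact hpt i (by omega) (by omega)
          have hRA : pvE f0 j = (PySem.List.pyRange j (F.length : Int)).filter
                (fun i => pvEmptyCh ((PySem.List.pyGet? F i).getD ' ')) ++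
                PySem.List.pyRange (F.length : Int) 15 := by
            unfold pvE
            rw [hsplit, List.filter_append, hReq]
            congr 1
            refine List.filter_eq_self.2 (fun i hi => ?_)
            obtain ⟨hi1, hi2⟩ := (PySem.List.mem_pyRange_one).1 hi
            have hnone : PySem.List.pyGet? f0 i = none := by
              rw [PySem.List.pyGet?_of_nonneg _ (by omega)]
              exact List.getElem?_eq_none (by omega)
            simp [pvEmpS, hnone, pvInDashAt]
          have hRB : pvEB F j = (PySem.List.pyRange j (F.length : Int)).filter
                (fun i => pvEmptyCh ((PySem.List.pyGet? F i).getD ' ')) := by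
            unfold pvEB
            rw [hsplit, List.filter_append]
            have hnil : (PySem.List.pyRange (F.length : Int) 15).filter
                (fun i => pvEmptyCh ((PySem.List.pyGet? F i).getD ' ')) = [] := by
              refine List.filter_eq_nil_iff.2 (fun i hi => ?_)
              obtain ⟨hi1, hi2⟩ := (PySem.List.mem_pyRange_one).1 hi
              have hnone : PySem.List.pyGet? F i = none := by
                rw [PySem.List.pyGet?_of_nonneg _ (by omega)]
                exact List.getElem?_eq_none (by omega)
              simp [hnone, pvEmptyCh]
            rw [hnil, List.append_nil]
          have hRlen : tiles.length ≤ ((PySem.List.pyRange j (F.length : Int)).filter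
              (fun i => pvEmptyCh ((PySem.List.pyGet? F i).getD ' '))).length := by
            rw [← List.countP_eq_length_filter]
            rw [← PySem.List.map_pyGetD_pyRange' F ' ' hj, List.countP_map] at hcnt
            refine le_trans hcnt (le_of_eq (List.countP_congr (fun i hi => ?_)))
            obtain ⟨hi1, hi2⟩ := (PySem.List.mem_pyRange_one).1 hi
            have h0i : (0 : Int) ≤ i := by omega
            simp only [Function.comp_apply, PySem.List.pyGetD_of_nonneg _ _ h0i,
              PySem.List.pyGet?_of_nonneg _ h0i, List.getD_eq_getElem?_getD]
          constructor
          · rw [hRA, hRB, List.take_append_of_le_length hRlen]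
          · rw [hRA, hRB]
            constructor
            · intro hl
              exact absurd hl (by simp only [List.length_append]; omega)
            · intro hl
              exact absurd hl (by omega)
        · have h0 : tiles.length = 0 := by
            rw [List.drop_eq_nil_of_le (by omega), List.countP_nil] at hcnt
            omega
          rw [h0]
          simp
    obtain ⟨htake, hcond⟩ := hmain
    by_cases hlt : (pvEB F j).length < tiles.length
    · rw [if_pos (hcond.2 hlt), if_pos hlt]
    · rw [if_neg (fun h => hlt (hcond.1 h)), if_neg hlt, htake]
      simp only [Bool.false_or]
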